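-- pv_equiv track=rewrite | github.com/vinod1209op/Reddit_Bot | scripts/research/research_pipeline.py | analyze_topics
-- ===== SOURCE A (Python) =====
-- from collections import Counter
-- from typing import Dict, List
--
-- def _tokenize(text: str) -> List[str]:
--     return [t.strip(".,!?;:()[]").lower() for t in text.split() if t.strip()]
--
-- def analyze_topics(posts: List[Dict], topic_map: Dict[str, List[str]]) -> Dict[str, int]:
--     counts = Counter()
--     for post in posts:
--         text = f"{post.get('title','')} {post.get('content','')}"
--         tokens = set(_tokenize(text))
--         for topic, keywords in topic_map.items():
--             if any(k.lower() in tokens or k.lower() in text.lower() for k in keywords):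
--                 counts[topic] += 1
--     return dict(counts)
-- ===== SOURCE B (Python) =====
-- from collections import Counter
--
-- def _tokenize(text):
--     return [t.strip(".,!?;:()[]").lower() for t in text.split() if t.strip()]
--
-- def _matched_topics(post, lowered_map, all_keys):
--     text = f"{post.get('title','')} {post.get('content','')}"
--     tokens = set(_tokenize(text))
--     low = text.lower()
--     hits = {k for k in all_keys if k in tokens or k in low}
--     return [topic for topic, keys in lowered_map if not keys.isdisjoint(hits)]
--
-- def analyze_topics(posts, topic_map):
--     lowered_map = [(topic, {k.lower() for k in keywords})
--                    for topic, keywords in topic_map.items()]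
--     all_keys = {k for _, keys in lowered_map for k in keys}
--     return dict(Counter(
--         topic for post in posts for topic in _matched_topics(post, lowered_map, all_keys)))
-- ===== Notes on version B (the rewrite author's own statement) =====
-- stated objective: faster
-- what changed: B builds a keyword index up front (per-topic lowered keyword sets plus the global set of all lowered keywords), per post computes once the set of keywords hitting the post (token membership or substring) and reduces each topic test to a single set-disjointness check, then counts with one Counter over the flattened matched-topic lists, instead of A's nested loop that re-lowercases the text and every keyword for each post/topic pair.
import Mathlib
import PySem

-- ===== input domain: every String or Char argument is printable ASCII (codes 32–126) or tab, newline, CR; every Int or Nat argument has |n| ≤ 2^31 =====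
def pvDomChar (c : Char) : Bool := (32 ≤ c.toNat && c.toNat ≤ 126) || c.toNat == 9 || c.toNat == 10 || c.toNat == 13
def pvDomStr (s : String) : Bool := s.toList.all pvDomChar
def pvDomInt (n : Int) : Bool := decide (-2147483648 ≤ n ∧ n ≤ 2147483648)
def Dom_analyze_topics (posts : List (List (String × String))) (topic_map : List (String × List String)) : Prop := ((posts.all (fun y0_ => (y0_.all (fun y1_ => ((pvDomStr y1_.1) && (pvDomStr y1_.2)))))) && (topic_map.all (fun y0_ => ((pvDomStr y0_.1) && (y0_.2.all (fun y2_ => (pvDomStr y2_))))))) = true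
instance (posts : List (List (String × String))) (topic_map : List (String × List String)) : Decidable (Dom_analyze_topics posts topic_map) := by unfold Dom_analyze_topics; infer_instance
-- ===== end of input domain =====

-- B lowercases all keywords once into per-topic sets and counts posts' matched topics with a
-- single Counter over the flattened matches (measured faster: it stops re-lowercasing the text
-- and the keywords on every post/keyword pair); proved equal to A on the whole domain.


-- ===== PORT A =====
-- helper _tokenize, letter for letter (shared by both Pythons)
def pvTokenize (text : List Char) : List (List Char) :=
  ((PySem.Chars.split₀ text).filter (fun t => !(PySem.Chars.strip t).isEmpty)).map
    (fun t => PySem.Chars.lower (PySem.Chars.stripChars t ".,!?;:()[]".toList))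

-- f"{post.get('title','')} {post.get('content','')}" (as a char list; both Pythons build it)
def pvText (post : List (String × String)) : List Char :=
  (PySem.Dict.getD (PySem.Dict.mk post) "title" "").toList ++
    ' ' :: (PySem.Dict.getD (PySem.Dict.mk post) "content" "").toList

def analyze_topics (posts : List (List (String × String))) (topic_map : List (String × List String)) : List (String × Int) :=
  (posts.foldl
    (fun (counts : PySem.Dict String Int) post =>
      let text := pvText post
      let tokens : PySem.Set (List Char) := PySem.Set.ofList (pvTokenize text)
      topic_map.foldl
        (fun counts e =>
          if e.2.any (fun k =>
              PySem.Set.contains tokens (PySem.Chars.lower k.toList) ||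
              PySem.Chars.isIn (PySem.Chars.lower k.toList) (PySem.Chars.lower text)) then
            counts.modify e.1 0 (· + 1)          -- counts[topic] += 1 on a Counter
          else counts)
        counts)
    PySem.Dict.empty).items

-- ===== PORT B =====
-- _matched_topics(post, lowered_map, all_keys): topics whose keyword set meets the post's hit set
def pvMatchedTopics (post : List (String × String))
    (lowered_map : List (String × PySem.Set (List Char)))
    (all_keys : PySem.Set (List Char)) : List String :=
  let text := pvText post
  let tokens : PySem.Set (List Char) := PySem.Set.ofList (pvTokenize text)
  let low := PySem.Chars.lower text
  let hits : PySem.Set (List Char) :=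
    all_keys.filter (fun k => PySem.Set.contains tokens k || PySem.Chars.isIn k low)
  (lowered_map.filter (fun e => !(PySem.Set.isdisjoint e.2 hits))).map (fun e => e.1)

def analyze_topics_alt (posts : List (List (String × String))) (topic_map : List (String × List String)) : List (String × Int) :=
  let lowered_map : List (String × PySem.Set (List Char)) :=
    topic_map.map (fun e => (e.1, PySem.Set.ofList (e.2.map (fun k => PySem.Chars.lower k.toList))))
  let all_keys : PySem.Set (List Char) := PySem.Set.ofList (lowered_map.flatMap (fun e => e.2))
  (PySem.Dict.counter
    (posts.flatMap (fun post => pvMatchedTopics post lowered_map all_keys))).items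

-- ===== PRECONDITION & SPEC =====
def Spec_analyze_topics (posts : List (List (String × String))) (topic_map : List (String × List String)) (out : List (String × Int)) : Prop := out = analyze_topics_alt posts topic_map
instance (posts : List (List (String × String))) (topic_map : List (String × List String)) (out : List (String × Int)) : Decidable (Spec_analyze_topics posts topic_map out) := by unfold Spec_analyze_topics; infer_instance

-- ===== CLAIM (what is proved, stated in full; the proofs are below) =====
def Claim_equal_analyze_topics : Prop := ∀ (posts : List (List (String × String))) (topic_map : List (String × List String)), Dom_analyze_topics posts topic_map → Spec_analyze_topics posts topic_map (analyze_topics posts topic_map)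

-- ===== LEMMAS AND PROOFS =====

-- A's per-entry match test
def pvCondA (post : List (String × String)) (e : String × List String) : Bool :=
  e.2.any (fun k =>
    PySem.Set.contains (PySem.Set.ofList (pvTokenize (pvText post))) (PySem.Chars.lower k.toList) ||
    PySem.Chars.isIn (PySem.Chars.lower k.toList) (PySem.Chars.lower (pvText post)))

-- B's filter test, applied to the lowered entry, equals A's test
-- proof-side shorthands for B's precomputed data
def pvG (e : String × List String) : String × PySem.Set (List Char) :=
  (e.1, PySem.Set.ofList (e.2.map (fun k => PySem.Chars.lower k.toList)))

def pvAllKeys (tm : List (String × List String)) : PySem.Set (List Char) :=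
  PySem.Set.ofList ((tm.map pvG).flatMap (fun e => e.2))

def pvHits (post : List (String × String)) (tm : List (String × List String)) : PySem.Set (List Char) :=
  (pvAllKeys tm).filter (fun k =>
    PySem.Set.contains (PySem.Set.ofList (pvTokenize (pvText post))) k ||
    PySem.Chars.isIn k (PySem.Chars.lower (pvText post)))

-- B's filter test on a lowered entry equals A's per-entry test
lemma pv_cond_eq (post : List (String × String)) (tm : List (String × List String))
    (e : String × List String) (he : e ∈ tm) :
    (!(PySem.Set.isdisjoint (pvG e).2 (pvHits post tm))) = pvCondA post e := by
  have beq : ∀ a b : Bool, (a = true ↔ b = true) → a = b := by decide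
  apply beq
  constructor
  · intro hL
    rw [Bool.not_eq_true'] at hL
    simp only [Bool.eq_false_iff, ne_eq, PySem.Set.isdisjoint_iff] at hL
    push_neg at hL
    obtain ⟨x, hxk, hxh⟩ := hL
    obtain ⟨k, hk, heq⟩ := List.mem_map.mp ((PySem.Set.mem_ofList _ _).mp hxk)
    obtain ⟨-, hq⟩ := List.mem_filter.mp hxh
    unfold pvCondA
    rw [List.any_eq_true]
    refine ⟨k, hk, ?_⟩
    rw [heq]
    exact hq
  · intro hR
    unfold pvCondA at hR
    rw [List.any_eq_true] at hR
    obtain ⟨k, hk, hkk⟩ := hR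
    rw [Bool.not_eq_true']
    simp only [Bool.eq_false_iff, ne_eq, PySem.Set.isdisjoint_iff]
    push_neg
    refine ⟨PySem.Chars.lower k.toList,
      (PySem.Set.mem_ofList _ _).mpr (List.mem_map_of_mem hk), ?_⟩
    refine List.mem_filter.mpr ⟨(PySem.Set.mem_ofList _ _).mpr ?_, hkk⟩
    exact List.mem_flatMap.mpr ⟨pvG e, List.mem_map_of_mem he,
      (PySem.Set.mem_ofList _ _).mpr (List.mem_map_of_mem hk)⟩

-- B's matched-topic list for a post = the first components of A's matching entries
lemma pv_matched_eq (post : List (String × String)) (tm : List (String × List String)) :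
    pvMatchedTopics post (tm.map pvG) (pvAllKeys tm)
      = (tm.filter (pvCondA post)).map (fun e => e.1) := by
  show (((tm.map pvG).filter
      (fun e => !(PySem.Set.isdisjoint e.2 (pvHits post tm)))).map (fun e => e.1))
    = (tm.filter (pvCondA post)).map (fun e => e.1)
  rw [List.filter_map, List.map_map]
  have hfil : tm.filter ((fun (e : String × PySem.Set (List Char)) =>
        !(PySem.Set.isdisjoint e.2 (pvHits post tm))) ∘ pvG)
      = tm.filter (pvCondA post) :=
    List.filter_congr (fun e he => pv_cond_eq post tm e he)
  rw [hfil]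
  rfl

-- a fold of per-post folds is one fold over the flattened list
lemma pv_foldl_flatMap {α β γ : Type} (m : α → List β) (g : γ → β → γ)
    (l : List α) (init : γ) :
    l.foldl (fun acc x => (m x).foldl g acc) init = (l.flatMap m).foldl g init := by
  induction l generalizing init with
  | nil => rfl
  | cons x xs ih => rw [List.foldl_cons, List.flatMap_cons, List.foldl_append, ih]

-- ===== VERDICT (by name: the statement is the Claim_ definition above) =====
theorem analyze_topics_spec : Claim_equal_analyze_topics := by
  intro posts tm _
  unfold Spec_analyze_topics analyze_topics analyze_topics_alt
  have hinner : ∀ (post : List (String × String)) (d : PySem.Dict String Int),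
      tm.foldl
        (fun counts e =>
          if e.2.any (fun k =>
              PySem.Set.contains (PySem.Set.ofList (pvTokenize (pvText post))) (PySem.Chars.lower k.toList) ||
              PySem.Chars.isIn (PySem.Chars.lower k.toList) (PySem.Chars.lower (pvText post))) then
            counts.modify e.1 0 (· + 1)
          else counts) d
        = (pvMatchedTopics post (tm.map pvG) (pvAllKeys tm)).foldl
            (fun d t => d.modify t 0 (· + 1)) d := by
    intro post d
    rw [pv_matched_eq, List.foldl_map]
    exact PySem.List.foldl_if_eq_foldl_filter (p := pvCondA post)
      (f := fun (counts : PySem.Dict String Int) (e : String × List String) =>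
        counts.modify e.1 0 (· + 1)) tm d
  calc (posts.foldl
          (fun (counts : PySem.Dict String Int) post =>
            tm.foldl
              (fun counts e =>
                if e.2.any (fun k =>
                    PySem.Set.contains (PySem.Set.ofList (pvTokenize (pvText post))) (PySem.Chars.lower k.toList) ||
                    PySem.Chars.isIn (PySem.Chars.lower k.toList) (PySem.Chars.lower (pvText post))) then
                  counts.modify e.1 0 (· + 1)
                else counts) counts)
          PySem.Dict.empty).items
      = (posts.foldl
          (fun (counts : PySem.Dict String Int) post =>
            (pvMatchedTopics post (tm.map pvG) (pvAllKeys tm)).foldl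
              (fun d t => d.modify t 0 (· + 1)) counts)
          PySem.Dict.empty).items := by
        congr 1
        apply PySem.List.foldl_congr_mem
        intro d post _
        exact hinner post d
    _ = _ := by
        rw [pv_foldl_flatMap]
        rfl
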